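-- pv_equiv track=rewrite | github.com/AngheloAlf/CIAC-Conglomerado-de-ejercicios | ejercicios/21 conjuntos/09 - Antiterroristas/Code/p1.py | habilidadesUnicas
-- ===== SOURCE A (Python) =====
-- def habilidadesUnicas(habilidades):
--     habUni = dict()
--     for codigo, listaHabilidades in habilidades.items():
--         habUni[codigo] = dict()
--         for hab in listaHabilidades:
--             habUni[codigo][hab] = 0
--             for codigo2, lista2 in habilidades.items():
--                 if codigo != codigo2 and hab in lista2:
--                     habUni[codigo][hab] += 1
--
--     habiRetornar = dict()
--     for cod, diccHabilidades in habUni.items():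
--         habiRetornar[cod] = set()
--         for hab, cantidad in diccHabilidades.items():
--             if cantidad == 0:
--                 habiRetornar[cod].add(hab)
--
--     return habiRetornar
-- ===== SOURCE B (Python) =====
-- def habilidadesUnicas(habilidades):
--     conteo = {}
--     for lista in habilidades.values():
--         for hab in set(lista):
--             conteo[hab] = conteo.get(hab, 0) + 1
--     return {cod: {hab for hab in lista if conteo[hab] == 1}
--             for cod, lista in habilidades.items()}
-- ===== Notes on version B (the rewrite author's own statement) =====
-- stated objective: faster
-- what changed: Replaces the per-code-per-skill rescan of all other codes with one global pass counting how many codes contain each skill; a skill is unique iff its count is 1.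
import Mathlib
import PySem

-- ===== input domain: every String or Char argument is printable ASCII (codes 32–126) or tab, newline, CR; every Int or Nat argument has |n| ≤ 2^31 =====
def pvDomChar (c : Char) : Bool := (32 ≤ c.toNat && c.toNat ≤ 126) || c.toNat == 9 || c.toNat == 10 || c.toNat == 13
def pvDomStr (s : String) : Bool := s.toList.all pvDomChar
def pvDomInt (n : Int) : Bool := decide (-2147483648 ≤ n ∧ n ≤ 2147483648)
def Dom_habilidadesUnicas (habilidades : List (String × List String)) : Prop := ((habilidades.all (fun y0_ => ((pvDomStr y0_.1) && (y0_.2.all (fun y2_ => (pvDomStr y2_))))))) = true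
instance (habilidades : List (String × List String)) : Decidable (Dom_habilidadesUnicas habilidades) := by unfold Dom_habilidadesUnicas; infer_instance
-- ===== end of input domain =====

-- B replaces A's per-code-per-skill rescan of all other codes by one global skill counter
-- (a skill is unique iff exactly its own code contains it); same results on Pre_.
-- Pre_ excludes association lists with duplicate outer keys: A's argument is a Python dict,
-- so duplicate keys cannot arise; on the list representation the ports' behaviour there is accidental.


-- ===== PORT A =====
def habilidadesUnicas (habilidades : List (String × List String)) : List (String × List String) :=
  let habUni : PySem.Dict String (PySem.Dict String Int) :=
    habilidades.foldl (fun habUni p =>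
      let habUni := habUni.insert p.1 PySem.Dict.empty
      p.2.foldl (fun habUni hab =>
        let habUni := habUni.insert p.1 ((habUni.getD p.1 PySem.Dict.empty).insert hab 0)
        habilidades.foldl (fun habUni q =>
          if ¬ (p.1 = q.1) ∧ hab ∈ q.2 then
            habUni.insert p.1 ((habUni.getD p.1 PySem.Dict.empty).modify hab 0 (· + 1))
          else habUni) habUni) habUni) PySem.Dict.empty
  let habiRetornar : PySem.Dict String (PySem.Set String) :=
    habUni.items.foldl (fun ret cd =>
      let ret := ret.insert cd.1 PySem.Set.empty
      cd.2.items.foldl (fun ret hc =>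
        if hc.2 = 0 then ret.insert cd.1 (PySem.Set.add (ret.getD cd.1 PySem.Set.empty) hc.1)
        else ret) ret) PySem.Dict.empty
  habiRetornar.items

-- ===== PORT B =====
-- conteo[hab] in the comprehension is ported with getD: hab comes from lista, so the key is
-- always present (no KeyError). The dict comprehension over the dict's items is the map below
-- (the outer keys are distinct under Pre_).
def habilidadesUnicas_alt (habilidades : List (String × List String)) : List (String × List String) :=
  let conteo : PySem.Dict String Int :=
    habilidades.foldl (fun conteo p =>
      (PySem.Set.ofList p.2).foldl (fun conteo hab => conteo.modify hab 0 (· + 1)) conteo)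
      PySem.Dict.empty
  habilidades.map (fun p => (p.1, PySem.Set.ofList (p.2.filter (fun hab => conteo.getD hab 0 == 1))))

-- ===== PRECONDITION & SPEC =====
-- Pre_ excludes association lists with duplicate outer keys: they cannot arise from A's dict
-- argument, and the ports' behaviour on them is an accident of the list representation.
def Pre_habilidadesUnicas (habilidades : List (String × List String)) : Prop :=
  (habilidades.map Prod.fst).Nodup
instance (habilidades : List (String × List String)) : Decidable (Pre_habilidadesUnicas habilidades) := by unfold Pre_habilidadesUnicas; infer_instance
def pvWitness_habilidadesUnicas : (List (String × List String)) :=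
  [("a", ["x", "y"]), ("b", ["y"])]
def Spec_habilidadesUnicas (habilidades : List (String × List String)) (out : List (String × List String)) : Prop := out = habilidadesUnicas_alt habilidades
instance (habilidades : List (String × List String)) (out : List (String × List String)) : Decidable (Spec_habilidadesUnicas habilidades out) := by unfold Spec_habilidadesUnicas; infer_instance

-- ===== CLAIM (what is proved, stated in full; the proofs are below) =====
def Claim_equal_habilidadesUnicas : Prop := ∀ (habilidades : List (String × List String)), Dom_habilidadesUnicas habilidades → Pre_habilidadesUnicas habilidades → Spec_habilidadesUnicas habilidades (habilidadesUnicas habilidades)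

-- ===== LEMMAS AND PROOFS =====

-- the number of OTHER codes whose list contains hab (what A's innermost loop counts)
def cntOther (hs : List (String × List String)) (c hab : String) : Int :=
  (hs.countP (fun q => decide (¬ (c = q.1) ∧ hab ∈ q.2)) : Int)

-- A's inner dict for code c with skill list l, after localisation of the loops
def innerA (hs : List (String × List String)) (c : String) (l : List String) : PySem.Dict String Int :=
  l.foldl (fun d hab => d.insert hab (cntOther hs c hab)) PySem.Dict.empty

-- a loop that conditionally rewrites only key c of a dict is a loop on that entry
theorem foldl_insert_local {κ ν α : Type} [BEq κ] [LawfulBEq κ]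
    (l : List α) (P : α → Prop) [DecidablePred P] (F : ν → α → ν) (c : κ) (dflt : ν) :
    ∀ (d : PySem.Dict κ ν) (v : ν),
    l.foldl (fun d x => if P x then d.insert c (F (d.getD c dflt) x) else d) (d.insert c v)
      = d.insert c (l.foldl (fun v x => if P x then F v x else v) v) := by
  induction l with
  | nil => intro d v; rfl
  | cons x xs ih =>
    intro d v
    by_cases h : P x
    · simp only [List.foldl_cons, if_pos h, PySem.Dict.getD_insert_self,
        PySem.Dict.insert_insert_self, ih]
    · simp only [List.foldl_cons, if_neg h, ih]

-- unconditional form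
theorem foldl_insert_local' {κ ν α : Type} [BEq κ] [LawfulBEq κ]
    (l : List α) (F : ν → α → ν) (c : κ) (dflt : ν) :
    ∀ (d : PySem.Dict κ ν) (v : ν),
    l.foldl (fun d x => d.insert c (F (d.getD c dflt) x)) (d.insert c v)
      = d.insert c (l.foldl F v) := by
  induction l with
  | nil => intro d v; rfl
  | cons x xs ih =>
    intro d v
    simp only [List.foldl_cons, PySem.Dict.getD_insert_self,
      PySem.Dict.insert_insert_self, ih]

-- n iterations of `d[c] += 1` on an entry just set
theorem foldl_modify_const {κ α : Type} [BEq κ] [LawfulBEq κ] (ms : List α) (c : κ) :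
    ∀ (d : PySem.Dict κ Int) (k : Int),
    ms.foldl (fun w (_ : α) => w.modify c 0 (· + 1)) (d.insert c k)
      = d.insert c (k + ms.length) := by
  induction ms with
  | nil => intro d k; simp
  | cons x xs ih =>
    intro d k
    have hstep : (d.insert c k).modify c 0 (· + 1) = d.insert c (k + 1) := by
      simp [PySem.Dict.modify, PySem.Dict.getD_insert_self, PySem.Dict.insert_insert_self]
    rw [List.foldl_cons, hstep, ih, List.length_cons]
    congr 1
    push_cast
    ring

-- A's innermost loop over all codes, for one skill hab of code c
theorem inner_loop_eq (hs : List (String × List String)) (c hab : String)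
    (v : PySem.Dict String Int) :
    hs.foldl (fun u q => if ¬ (c = q.1) ∧ hab ∈ q.2 then u.modify hab 0 (· + 1) else u)
        (v.insert hab 0)
      = v.insert hab (cntOther hs c hab) := by
  rw [PySem.List.foldl_ite_eq_foldl_filter, foldl_modify_const]
  congr 1
  simp [cntOther, List.countP_eq_length_filter]

-- lookup after a fold of inserts whose value depends only on the key
theorem getD_foldl_insert_keyfun {κ ν : Type} [BEq κ] [LawfulBEq κ] [DecidableEq κ]
    (l : List κ) (f : κ → ν) (dflt : ν) (h : κ) :
    ∀ (d : PySem.Dict κ ν),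
    (l.foldl (fun d x => d.insert x (f x)) d).getD h dflt
      = if h ∈ l then f h else d.getD h dflt := by
  induction l with
  | nil => intro d; simp
  | cons x xs ih =>
    intro d
    simp only [List.foldl_cons, ih, PySem.Dict.getD_insert, List.mem_cons]
    by_cases hx : h = x
    · subst hx; by_cases hm : h ∈ xs <;> simp [hm]
    · by_cases hm : h ∈ xs <;> simp [hm, hx]

-- conditional set-building over distinct fresh elements is a filter
theorem foldl_set_add_if {α : Type} [BEq α] [LawfulBEq α] (P : α → Prop) [DecidablePred P] :
    ∀ (xs : List α) (s : PySem.Set α), xs.Nodup → (∀ x ∈ xs, x ∉ s) →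
    xs.foldl (fun s x => if P x then PySem.Set.add s x else s) s
      = s ++ xs.filter (fun x => decide (P x)) := by
  intro xs
  induction xs with
  | nil => intro s _ _; simp
  | cons x xs ih =>
    intro s hnd hfresh
    have hxns : x ∉ s := hfresh x (List.mem_cons_self)
    by_cases h : P x
    · have hadd : PySem.Set.add s x = s ++ [x] := by
        simp [PySem.Set.add, PySem.Set.contains, hxns]
      rw [List.foldl_cons, if_pos h, hadd,
        ih (s ++ [x]) hnd.of_cons (by
          intro y hy
          simp only [List.mem_append, List.mem_singleton]
          rintro (hys | rfl)
          · exact hfresh y (List.mem_cons_of_mem _ hy) hys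
          · exact (List.nodup_cons.mp hnd).1 hy)]
      simp [h]
    · rw [List.foldl_cons, if_neg h,
        ih s hnd.of_cons (fun y hy => hfresh y (List.mem_cons_of_mem _ hy))]
      simp [h]

-- B's counter counts the codes whose list contains hab
theorem conteo_getD (hab : String) :
    ∀ (hs : List (String × List String)) (d : PySem.Dict String Int),
    (hs.foldl (fun d p =>
        (PySem.Set.ofList p.2).foldl (fun d x => d.modify x 0 (· + 1)) d) d).getD hab 0
      = d.getD hab 0 + (hs.countP (fun p => decide (hab ∈ p.2)) : Int) := by
  intro hs
  induction hs with
  | nil => intro d; simp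
  | cons p ps ih =>
    intro d
    rw [List.foldl_cons, ih, PySem.Dict.getD_foldl_modify_add_one]
    have hcount : (PySem.Set.ofList p.2).count hab = if hab ∈ p.2 then 1 else 0 := by
      by_cases hm : hab ∈ p.2
      · rw [if_pos hm]
        exact List.count_eq_one_of_mem (PySem.Set.nodup_ofList p.2)
          ((PySem.Set.mem_ofList p.2 hab).mpr hm)
      · rw [if_neg hm, List.count_eq_zero]
        exact fun hc => hm ((PySem.Set.mem_ofList p.2 hab).mp hc)
    rw [hcount, List.countP_cons]
    by_cases hm : hab ∈ p.2
    · simp [hm]; ring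
    · simp [hm]

-- with distinct keys, the total count splits as "other codes" + 1 for the own code
theorem countP_split (c : String) (l : List String) (hab : String) (hmem : hab ∈ l) :
    ∀ (hs : List (String × List String)), (hs.map Prod.fst).Nodup → (c, l) ∈ hs →
    hs.countP (fun p => decide (hab ∈ p.2))
      = hs.countP (fun q => decide (¬ (c = q.1) ∧ hab ∈ q.2)) + 1 := by
  intro hs
  induction hs with
  | nil => intro _ h; cases h
  | cons a t ih =>
    intro hnd hm
    have hnd' : (t.map Prod.fst).Nodup := (List.nodup_cons.mp hnd).2
    rcases List.mem_cons.mp hm with rfl | hmt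
    · have hct : ∀ q ∈ t, q.1 ≠ c := by
        intro q hq hqc
        exact (List.nodup_cons.mp hnd).1 (List.mem_map.mpr ⟨q, hq, hqc⟩)
      have heq : t.countP (fun p => decide (hab ∈ p.2))
          = t.countP (fun q => decide (¬ (c = q.1) ∧ hab ∈ q.2)) := by
        apply List.countP_congr
        intro q hq
        have hq1 := hct q hq
        simp only [decide_eq_true_eq]
        exact ⟨fun hm2 => ⟨fun h => hq1 h.symm, hm2⟩, fun h => h.2⟩
      simp only [List.countP_cons, heq]
      simp [hmem]
    · have hac : a.1 ≠ c := by
        intro h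
        exact (List.nodup_cons.mp hnd).1 (h ▸ List.mem_map.mpr ⟨(c, l), hmt, rfl⟩)
      rw [List.countP_cons, List.countP_cons, ih hnd' hmt]
      have hb : (decide (hab ∈ a.2) : Bool) = decide (¬ (c = a.1) ∧ hab ∈ a.2) := by
        simp only [decide_eq_decide]
        exact ⟨fun hm2 => ⟨fun h => hac h.symm, hm2⟩, fun h => h.2⟩
      rw [hb]
      omega

-- dedup commutes with filter
theorem set_ofList_filter {α : Type} [BEq α] [LawfulBEq α] (p : α → Bool) (l : List α) :
    PySem.Set.ofList (l.filter p) = (PySem.Set.ofList l).filter p := by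
  suffices h : ∀ (l : List α) (s : PySem.Set α),
      (l.foldl PySem.Set.add s).filter p = (l.filter p).foldl PySem.Set.add (s.filter p) by
    have := h l []
    simpa [PySem.Set.ofList, PySem.Set.empty] using this.symm
  intro l
  induction l with
  | nil => intro s; simp
  | cons x xs ih =>
    intro s
    have hadd : (PySem.Set.add s x).filter p
        = if p x then PySem.Set.add (s.filter p) x else s.filter p := by
      by_cases hxs : x ∈ s
      · have h1 : PySem.Set.add s x = s := by
          simp [PySem.Set.add, PySem.Set.contains, hxs]
        by_cases hp : p x
        · have h2 : x ∈ s.filter p := List.mem_filter.mpr ⟨hxs, hp⟩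
          simp [hxs, hp, PySem.Set.add, PySem.Set.contains, h2]
        · simp [h1, hp]
      · have h1 : PySem.Set.add s x = s ++ [x] := by
          simp [PySem.Set.add, PySem.Set.contains, hxs]
        by_cases hp : p x
        · have h2 : x ∉ s.filter p := fun hc => hxs (List.mem_filter.mp hc).1
          simp [hxs, hp, PySem.Set.add, PySem.Set.contains, h2, List.filter_append]
        · simp [h1, hp, List.filter_append]
    by_cases hp : p x
    · rw [List.foldl_cons, ih, hadd, if_pos hp, List.filter_cons_of_pos hp, List.foldl_cons]
    · rw [List.foldl_cons, ih, hadd, if_neg hp, List.filter_cons_of_neg (by simp [hp])]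

-- A's habUni, with the loops localised to the entry of the current code
theorem habUni_eq (hs : List (String × List String)) :
    hs.foldl (fun habUni p =>
      let habUni := habUni.insert p.1 PySem.Dict.empty
      p.2.foldl (fun habUni hab =>
        let habUni := habUni.insert p.1 ((habUni.getD p.1 PySem.Dict.empty).insert hab 0)
        hs.foldl (fun habUni q =>
          if ¬ (p.1 = q.1) ∧ hab ∈ q.2 then
            habUni.insert p.1 ((habUni.getD p.1 PySem.Dict.empty).modify hab 0 (· + 1))
          else habUni) habUni) habUni) PySem.Dict.empty
    = hs.foldl (fun hu p => hu.insert p.1 (innerA hs p.1 p.2)) PySem.Dict.empty := by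
  apply PySem.List.foldl_congr_mem
  intro hu p _
  show p.2.foldl _ (hu.insert p.1 PySem.Dict.empty) = hu.insert p.1 (innerA hs p.1 p.2)
  have hmid : ∀ (d : PySem.Dict String (PySem.Dict String Int)) (hab : String),
      hs.foldl (fun habUni q =>
          if ¬ (p.1 = q.1) ∧ hab ∈ q.2 then
            habUni.insert p.1 ((habUni.getD p.1 PySem.Dict.empty).modify hab 0 (· + 1))
          else habUni)
        (d.insert p.1 ((d.getD p.1 PySem.Dict.empty).insert hab 0))
      = d.insert p.1 ((d.getD p.1 PySem.Dict.empty).insert hab (cntOther hs p.1 hab)) := by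
    intro d hab
    rw [foldl_insert_local hs (fun q => ¬ (p.1 = q.1) ∧ hab ∈ q.2)
      (fun w _ => w.modify hab 0 (· + 1)) p.1 PySem.Dict.empty d
      ((d.getD p.1 PySem.Dict.empty).insert hab 0)]
    rw [inner_loop_eq]
  calc p.2.foldl (fun habUni hab =>
          let habUni := habUni.insert p.1 ((habUni.getD p.1 PySem.Dict.empty).insert hab 0)
          hs.foldl (fun habUni q =>
            if ¬ (p.1 = q.1) ∧ hab ∈ q.2 then
              habUni.insert p.1 ((habUni.getD p.1 PySem.Dict.empty).modify hab 0 (· + 1))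
            else habUni) habUni) (hu.insert p.1 PySem.Dict.empty)
      = p.2.foldl (fun d hab =>
          d.insert p.1 ((d.getD p.1 PySem.Dict.empty).insert hab (cntOther hs p.1 hab)))
          (hu.insert p.1 PySem.Dict.empty) := by
        exact PySem.List.foldl_congr_mem _ _ _ _ (fun d hab _ => hmid d hab)
    _ = hu.insert p.1 (p.2.foldl (fun v hab => v.insert hab (cntOther hs p.1 hab))
          PySem.Dict.empty) := by
        exact foldl_insert_local' p.2 (fun v hab => v.insert hab (cntOther hs p.1 hab))
          p.1 PySem.Dict.empty hu PySem.Dict.empty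
    _ = hu.insert p.1 (innerA hs p.1 p.2) := rfl

-- items of A's inner dict: first-occurrence-deduped skills, each with its other-code count
theorem innerA_items (hs : List (String × List String)) (c : String) (l : List String) :
    (innerA hs c l).items = (PySem.Set.ofList l).map (fun hab => (hab, cntOther hs c hab)) := by
  have hnd : (innerA hs c l).keys.Nodup := by
    apply PySem.Dict.nodup_keys_foldl_insert l (fun _ hab => cntOther hs c hab)
    simp [PySem.Dict.keys_empty]
  have hk : (innerA hs c l).keys = PySem.Set.ofList l := by
    show (l.foldl (fun d hab => d.insert hab (cntOther hs c hab)) PySem.Dict.empty).keys = _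
    rw [PySem.Dict.keys_foldl_insert l (fun _ hab => cntOther hs c hab) PySem.Dict.empty]
    simp [PySem.Dict.keys_empty, PySem.Set.update, PySem.Set.ofList, PySem.Set.empty]
  rw [PySem.Dict.items_eq_map_keys _ hnd 0, hk]
  apply List.map_congr_left
  intro hab hmem
  have hmem' : hab ∈ l := (PySem.Set.mem_ofList l hab).mp hmem
  have := getD_foldl_insert_keyfun l (fun hab => cntOther hs c hab) 0 hab PySem.Dict.empty
  show (hab, (innerA hs c l).getD hab 0) = _
  rw [show (innerA hs c l).getD hab 0
      = (l.foldl (fun d hab => d.insert hab (cntOther hs c hab)) PySem.Dict.empty).getD hab 0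
      from rfl, this, if_pos hmem']

-- ===== VERDICT (by name: the statement is the Claim_ definition above) =====
theorem habilidadesUnicas_spec : Claim_equal_habilidadesUnicas := by
  intro hs _ hpre
  unfold Spec_habilidadesUnicas habilidadesUnicas habilidadesUnicas_alt
  simp only []
  rw [habUni_eq]
  -- phase 1: habUni's items are one fresh entry per code
  have hitems1 : (hs.foldl (fun hu p => hu.insert p.1 (innerA hs p.1 p.2))
        PySem.Dict.empty).items = hs.map (fun p => (p.1, innerA hs p.1 p.2)) := by
    have := PySem.Dict.items_foldl_insert_fresh hs Prod.fst (fun p => innerA hs p.1 p.2)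
      PySem.Dict.empty (fun a _ => PySem.Dict.contains_empty a.1) hpre
    simpa using this
  rw [hitems1]
  -- phase 2: localise the per-code set-building loop
  have hmid2 : ∀ (ret : PySem.Dict String (PySem.Set String)) (cd : String × PySem.Dict String Int),
      cd.2.items.foldl (fun ret hc =>
          if hc.2 = 0 then ret.insert cd.1 (PySem.Set.add (ret.getD cd.1 PySem.Set.empty) hc.1)
          else ret) (ret.insert cd.1 PySem.Set.empty)
        = ret.insert cd.1 (cd.2.items.foldl (fun s hc =>
            if hc.2 = 0 then PySem.Set.add s hc.1 else s) PySem.Set.empty) :=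
    fun ret cd => foldl_insert_local cd.2.items (fun hc => hc.2 = 0)
      (fun s hc => PySem.Set.add s hc.1) cd.1 PySem.Set.empty ret PySem.Set.empty
  rw [PySem.List.foldl_congr_mem _ _
    (fun ret cd => ret.insert cd.1 (cd.2.items.foldl (fun s hc =>
      if hc.2 = 0 then PySem.Set.add s hc.1 else s) PySem.Set.empty)) _
    (fun ret cd _ => hmid2 ret cd)]
  -- phase 2 inserts one fresh entry per code as well
  have hnd2 : ((hs.map (fun p => (p.1, innerA hs p.1 p.2))).map Prod.fst).Nodup := by
    rw [List.map_map]
    exact hpre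
  have hitems2 := PySem.Dict.items_foldl_insert_fresh
    (hs.map (fun p => (p.1, innerA hs p.1 p.2))) Prod.fst
    (fun cd => cd.2.items.foldl (fun s hc =>
      if hc.2 = 0 then PySem.Set.add s hc.1 else s) PySem.Set.empty)
    PySem.Dict.empty (fun a _ => PySem.Dict.contains_empty a.1) hnd2
  rw [hitems2]
  rw [show (PySem.Dict.empty : PySem.Dict String (PySem.Set String)).items = [] from rfl,
    List.nil_append, List.map_map]
  -- compare code by code
  apply List.map_congr_left
  intro p hp
  simp only [Function.comp]
  congr 1
  -- A's set for code p: filter the deduped skill list by "no other code has it"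
  rw [innerA_items, List.foldl_map]
  change List.foldl (fun s hab => if cntOther hs p.1 hab = 0 then PySem.Set.add s hab else s)
    PySem.Set.empty (PySem.Set.ofList p.2) = _
  rw [foldl_set_add_if (fun hab => cntOther hs p.1 hab = 0) (PySem.Set.ofList p.2)
      PySem.Set.empty (PySem.Set.nodup_ofList p.2) (by simp [PySem.Set.empty]),
    set_ofList_filter]
  rw [show (PySem.Set.empty : PySem.Set String) = [] from rfl, List.nil_append]
  -- B's counter agrees with A's per-skill count on the skills of p
  apply List.filter_congr
  intro hab hmem
  have hmem' : hab ∈ p.2 := (PySem.Set.mem_ofList p.2 hab).mp hmem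
  have htot := conteo_getD hab hs PySem.Dict.empty
  have hsplit := countP_split p.1 p.2 hab hmem' hs hpre (by
    rcases p with ⟨c, l⟩; exact hp)
  rw [htot, PySem.Dict.getD_empty, Bool.beq_eq_decide_eq, decide_eq_decide]
  rw [hsplit]
  unfold cntOther
  push_cast
  omega
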